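-- pv_equiv track=rewrite | github.com/mzmine/mzmine | external_tools/chemaudit/vendor/ChemAudit/backend/app/services/batch/result_aggregator.py | _compute_score_distribution
-- ===== SOURCE A (Python) =====
-- from typing import Any, Dict, List, Optional
--
-- def _compute_score_distribution(scores: List[int]) -> Dict[str, int]:
--     """
--     Compute histogram buckets for validation scores.
--
--     Buckets:
--     - excellent: 90-100
--     - good: 70-89
--     - moderate: 50-69
--     - poor: 0-49
--     """
--     distribution = {"excellent": 0, "good": 0, "moderate": 0, "poor": 0}
--
--     for score in scores:
--         if score >= 90:
--             distribution["excellent"] += 1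
--         elif score >= 70:
--             distribution["good"] += 1
--         elif score >= 50:
--             distribution["moderate"] += 1
--         else:
--             distribution["poor"] += 1
--
--     return distribution
-- ===== SOURCE B (Python) =====
-- import bisect
--
-- def _compute_score_distribution(scores):
--     """Sort once, then slice the sorted list at the 50/70/90 boundaries with
--     binary search; each bucket size is a difference of cut positions."""
--     s = sorted(scores)
--     n = len(s)
--     i50 = bisect.bisect_left(s, 50)
--     i70 = bisect.bisect_left(s, 70)
--     i90 = bisect.bisect_left(s, 90)
--     return {
--         "excellent": n - i90,
--         "good": i90 - i70,
--         "moderate": i70 - i50,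
--         "poor": i50,
--     }
-- ===== Notes on version B (the rewrite author's own statement) =====
-- stated objective: alternative
-- what changed: Replaces the per-element if-elif cascade over four dict counters by sort-then-cut: sort the scores once, find the 50/70/90 cut positions with bisect_left binary searches, and read each bucket size off as a difference of cut positions (no per-element bucketing loop at all).
import Mathlib
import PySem

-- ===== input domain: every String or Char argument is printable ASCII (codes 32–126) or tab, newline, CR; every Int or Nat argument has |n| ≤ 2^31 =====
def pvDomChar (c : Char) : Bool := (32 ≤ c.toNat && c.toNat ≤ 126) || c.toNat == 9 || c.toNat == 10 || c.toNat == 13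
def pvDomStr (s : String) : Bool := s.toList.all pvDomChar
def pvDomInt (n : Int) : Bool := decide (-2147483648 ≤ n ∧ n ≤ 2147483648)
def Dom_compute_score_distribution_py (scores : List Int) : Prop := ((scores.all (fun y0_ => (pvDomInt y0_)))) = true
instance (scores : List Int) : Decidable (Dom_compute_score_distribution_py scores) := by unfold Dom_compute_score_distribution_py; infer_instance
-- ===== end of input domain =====

-- B replaces A's per-element if-elif cascade over four dict counters by sort-then-cut:
-- sort the scores once, find the 50/70/90 cut positions with bisect_left, and read each
-- bucket size off as a difference of cut positions (objective: alternative algorithm).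

-- ===== PORT A =====
-- loop body: the if/elif/else cascade incrementing the matching dict entry
def pvStepA (d : PySem.Dict String Int) (score : Int) : PySem.Dict String Int :=
  if score ≥ 90 then d.modify "excellent" 0 (· + 1)
  else if score ≥ 70 then d.modify "good" 0 (· + 1)
  else if score ≥ 50 then d.modify "moderate" 0 (· + 1)
  else d.modify "poor" 0 (· + 1)

def compute_score_distribution_py (scores : List Int) : List (String × Int) :=
  (scores.foldl pvStepA
    (PySem.Dict.mk [("excellent", 0), ("good", 0), ("moderate", 0), ("poor", 0)])).items

-- ===== PORT B =====
def compute_score_distribution_py_alt (scores : List Int) : List (String × Int) :=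
  let s := PySem.List.sorted scores (fun x => x) false
  let n : Int := s.length
  let i50 : Int := PySem.List.bisectLeft s 50
  let i70 : Int := PySem.List.bisectLeft s 70
  let i90 : Int := PySem.List.bisectLeft s 90
  [("excellent", n - i90), ("good", i90 - i70), ("moderate", i70 - i50), ("poor", i50)]

-- ===== PRECONDITION & SPEC =====
def Spec_compute_score_distribution_py (scores : List Int) (out : List (String × Int)) : Prop := out = compute_score_distribution_py_alt scores
instance (scores : List Int) (out : List (String × Int)) : Decidable (Spec_compute_score_distribution_py scores out) := by unfold Spec_compute_score_distribution_py; infer_instance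

-- ===== CLAIM =====
def Claim_equal_compute_score_distribution_py : Prop := ∀ (scores : List Int), Dom_compute_score_distribution_py scores → Spec_compute_score_distribution_py scores (compute_score_distribution_py scores)

-- ===== LEMMAS AND PROOFS =====

lemma stepA_eq (x a b c d : Int) :
    pvStepA (PySem.Dict.mk [("excellent", a), ("good", b), ("moderate", c), ("poor", d)]) x
    = PySem.Dict.mk
        [("excellent", a + if 90 ≤ x then 1 else 0),
         ("good", b + if 70 ≤ x ∧ x < 90 then 1 else 0),
         ("moderate", c + if 50 ≤ x ∧ x < 70 then 1 else 0),
         ("poor", d + if x < 50 then 1 else 0)] := by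
  by_cases h90 : 90 ≤ x
  · simp only [pvStepA, ge_iff_le, h90, if_pos]
    simp [PySem.Dict.modify, PySem.Dict.insert, PySem.Dict.getD, PySem.Dict.get?]
    omega
  · by_cases h70 : 70 ≤ x
    · simp only [pvStepA, ge_iff_le, h90, h70, if_neg, if_pos, not_false_iff]
      simp [PySem.Dict.modify, PySem.Dict.insert, PySem.Dict.getD, PySem.Dict.get?]
      omega
    · by_cases h50 : 50 ≤ x
      · simp only [pvStepA, ge_iff_le, h90, h70, h50, if_neg, if_pos, not_false_iff]
        simp [PySem.Dict.modify, PySem.Dict.insert, PySem.Dict.getD, PySem.Dict.get?]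
        omega
      · simp only [pvStepA, ge_iff_le, h90, h70, h50, if_neg, not_false_iff]
        simp [PySem.Dict.modify, PySem.Dict.insert, PySem.Dict.getD, PySem.Dict.get?]
        omega

lemma loopA (scores : List Int) (a b c d : Int) :
    scores.foldl pvStepA (PySem.Dict.mk [("excellent", a), ("good", b), ("moderate", c), ("poor", d)])
    = PySem.Dict.mk
        [("excellent", a + (scores.countP (fun s => decide (90 ≤ s)) : Int)),
         ("good", b + (scores.countP (fun s => decide (70 ≤ s ∧ s < 90)) : Int)),
         ("moderate", c + (scores.countP (fun s => decide (50 ≤ s ∧ s < 70)) : Int)),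
         ("poor", d + (scores.countP (fun s => decide (s < 50)) : Int))] := by
  induction scores generalizing a b c d with
  | nil => simp
  | cons x xs ih =>
    rw [List.foldl_cons, stepA_eq, ih]
    simp only [List.countP_cons, PySem.Dict.mk.injEq, List.cons.injEq, Prod.mk.injEq,
      decide_eq_true_eq, true_and, and_true]
    split_ifs <;> push_cast <;> omega

-- bisect_left on a sorted list counts the elements below the probe
lemma bisect_eq_countP (s : List Int) (hs : s.Pairwise (· ≤ ·)) (x : Int) :
    (PySem.List.bisectLeft s x : Nat) = s.countP (fun y => decide (y < x)) := by
  obtain ⟨hk, hlt, hge⟩ := PySem.List.bisectLeft_spec s x hs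
  set k := PySem.List.bisectLeft s x with hkdef
  conv_rhs => rw [← List.take_append_drop k s]
  rw [List.countP_append]
  have h1 : (s.take k).countP (fun y => decide (y < x)) = (s.take k).length := by
    apply List.countP_eq_length.2
    intro a ha
    rw [List.mem_take_iff_getElem] at ha
    obtain ⟨j, hj, rfl⟩ := ha
    simp only [decide_eq_true_eq]
    exact hlt j (by omega) (by omega)
  have h2 : (s.drop k).countP (fun y => decide (y < x)) = 0 := by
    apply List.countP_eq_zero.2
    intro a ha
    rw [List.mem_drop_iff_getElem] at ha
    obtain ⟨j, hj, rfl⟩ := ha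
    simp only [decide_eq_true_eq, not_lt]
    exact hge (k + j) (by omega) (by omega)
  rw [h1, h2, List.length_take]
  omega

lemma countP_length_split (l : List Int) (b : Int) :
    l.length = l.countP (fun y => decide (y < b)) + l.countP (fun y => decide (b ≤ y)) := by
  induction l with
  | nil => simp
  | cons x xs ih =>
    simp only [List.countP_cons, List.length_cons, decide_eq_true_eq]
    split_ifs <;> omega

lemma countP_lt_split (l : List Int) (a b : Int) (hab : a ≤ b) :
    l.countP (fun y => decide (y < b))
      = l.countP (fun y => decide (y < a)) + l.countP (fun y => decide (a ≤ y ∧ y < b)) := by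
  induction l with
  | nil => simp
  | cons x xs ih =>
    simp only [List.countP_cons, decide_eq_true_eq]
    split_ifs <;> omega

-- ===== VERDICT =====
theorem compute_score_distribution_py_spec : Claim_equal_compute_score_distribution_py := by
  intro scores _
  unfold Spec_compute_score_distribution_py
  unfold compute_score_distribution_py compute_score_distribution_py_alt
  rw [loopA]
  set s := PySem.List.sorted scores (fun x => x) false with hs
  have hperm : s.Perm scores := PySem.List.sorted_perm scores (fun x => x) false
  have hpw : s.Pairwise (· ≤ ·) := PySem.List.sorted_pairwise scores (fun x => x)
  have hcnt : ∀ p : Int → Bool, s.countP p = scores.countP p := fun p => hperm.countP_eq p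
  have hlen : s.length = scores.length := hperm.length_eq
  have b50 := bisect_eq_countP s hpw 50
  have b70 := bisect_eq_countP s hpw 70
  have b90 := bisect_eq_countP s hpw 90
  rw [hcnt] at b50 b70 b90
  have s5070 := countP_lt_split scores 50 70 (by norm_num)
  have s7090 := countP_lt_split scores 70 90 (by norm_num)
  have hn := countP_length_split scores 90
  simp only [List.cons.injEq, Prod.mk.injEq, true_and, and_true]
  refine ⟨?_, ?_, ?_, ?_⟩ <;> push_cast [b50, b70, b90, hlen] <;> omega
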